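-- pv_equiv track=rewrite | github.com/YonatanSasoony/EvolutionaryAlgorithmVertexCover- | MiniProject/main.py | fitness_cover_bonus
-- ===== SOURCE A (Python) =====
-- def fitness_cover_bonus(cover, edges, covers):
--     score = 1
--     for edge in edges:
--         (u, v) = edge
--         if cover[u] == 0 and cover[v] == 0:
--             score += 0
--         elif cover[u] == 1 and cover[v] == 1:
--             score += 0
--         else:
--             score += 5
--     if is_cover(cover, edges):
--         score += len(edges)
--     return score
--
-- def is_cover(cover, edges):
--     for edge in edges:
--         (u, v) = edge
--         if cover[u] == 0 and cover[v] == 0: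
--             return False
--     return True
-- ===== SOURCE B (Python) =====
-- def fitness_cover_bonus(cover, edges, covers):
--     score = 1
--     fully_covered = True
--     for (u, v) in edges:
--         if cover[u] == 0 and cover[v] == 0:
--             fully_covered = False
--         elif cover[u] == 1 and cover[v] == 1:
--             pass
--         else:
--             score += 5
--     if fully_covered:
--         score += len(edges)
--     return score
-- ===== Notes on version B (the rewrite author's own statement) =====
-- stated objective: simpler
-- what changed: Fuses A's two edge passes (the scoring loop plus the separate is_cover scan) into one pass maintaining a fully_covered flag alongside the score, so edges and cover are traversed once.
import Mathlib
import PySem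

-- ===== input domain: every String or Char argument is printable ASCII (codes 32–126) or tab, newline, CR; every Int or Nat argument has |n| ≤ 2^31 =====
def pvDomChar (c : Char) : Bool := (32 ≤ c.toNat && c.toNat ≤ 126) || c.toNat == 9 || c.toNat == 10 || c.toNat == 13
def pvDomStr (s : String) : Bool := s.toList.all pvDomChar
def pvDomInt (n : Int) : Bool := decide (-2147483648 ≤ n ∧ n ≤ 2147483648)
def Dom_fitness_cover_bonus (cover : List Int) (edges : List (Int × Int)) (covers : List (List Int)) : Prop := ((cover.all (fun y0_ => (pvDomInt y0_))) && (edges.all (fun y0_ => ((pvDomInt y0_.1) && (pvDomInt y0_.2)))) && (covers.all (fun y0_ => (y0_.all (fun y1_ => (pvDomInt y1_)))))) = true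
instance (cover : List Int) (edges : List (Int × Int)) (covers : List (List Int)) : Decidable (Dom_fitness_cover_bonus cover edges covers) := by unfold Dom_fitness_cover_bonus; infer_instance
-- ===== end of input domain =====

-- ===== PORT A =====
-- A raises IndexError on an out-of-range vertex index; Pre_ excludes exactly those inputs.
def pv_is_cover (cover : List Int) (edges : List (Int × Int)) : Bool :=
  match edges with
  | [] => true
  | (u, v) :: rest =>
    if PySem.List.pyGetD cover u 0 = 0 ∧ PySem.List.pyGetD cover v 0 = 0 then false
    else pv_is_cover cover rest

def fitness_cover_bonus (cover : List Int) (edges : List (Int × Int)) (covers : List (List Int)) : Int :=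
  let score := edges.foldl (fun s e =>
    if PySem.List.pyGetD cover e.1 0 = 0 ∧ PySem.List.pyGetD cover e.2 0 = 0 then s + 0
    else if PySem.List.pyGetD cover e.1 0 = 1 ∧ PySem.List.pyGetD cover e.2 0 = 1 then s + 0
    else s + 5) 1
  if pv_is_cover cover edges then score + (edges.length : Int) else score

-- ===== PORT B =====
-- One fused pass: score and fully_covered flag carried together.
def fitness_cover_bonus_alt (cover : List Int) (edges : List (Int × Int)) (covers : List (List Int)) : Int :=
  let st := edges.foldl (fun (st : Int × Bool) e =>
    if PySem.List.pyGetD cover e.1 0 = 0 ∧ PySem.List.pyGetD cover e.2 0 = 0 then (st.1, false)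
    else if PySem.List.pyGetD cover e.1 0 = 1 ∧ PySem.List.pyGetD cover e.2 0 = 1 then st
    else (st.1 + 5, st.2)) (1, true)
  if st.2 then st.1 + (edges.length : Int) else st.1

-- ===== PRECONDITION & SPEC =====
-- Pre_: on each edge, u is a valid (possibly negative) Python index into cover, and v is too
-- whenever cover[u] ∈ {0, 1} (otherwise Python's `and` short-circuits and cover[v] is never read);
-- outside this A raises IndexError.
def Pre_fitness_cover_bonus (cover : List Int) (edges : List (Int × Int)) (covers : List (List Int)) : Prop :=
  ∀ e ∈ edges, PySem.Raise.InRange cover.length e.1 ∧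
    ((PySem.List.pyGetD cover e.1 0 = 0 ∨ PySem.List.pyGetD cover e.1 0 = 1) → PySem.Raise.InRange cover.length e.2)
instance (cover : List Int) (edges : List (Int × Int)) (covers : List (List Int)) : Decidable (Pre_fitness_cover_bonus cover edges covers) := by unfold Pre_fitness_cover_bonus; infer_instance
def pvWitness_fitness_cover_bonus : List Int × (List (Int × Int)) × List (List Int) := ([1, 0, 1], [(0, 1), (1, 2), (-1, 0)], [])
def Spec_fitness_cover_bonus (cover : List Int) (edges : List (Int × Int)) (covers : List (List Int)) (out : Int) : Prop := out = fitness_cover_bonus_alt cover edges covers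
instance (cover : List Int) (edges : List (Int × Int)) (covers : List (List Int)) (out : Int) : Decidable (Spec_fitness_cover_bonus cover edges covers out) := by unfold Spec_fitness_cover_bonus; infer_instance

-- ===== CLAIM (what is proved, stated in full; the proofs are below) =====
def Claim_equal_fitness_cover_bonus : Prop := ∀ (cover : List Int) (edges : List (Int × Int)) (covers : List (List Int)), Dom_fitness_cover_bonus cover edges covers → Pre_fitness_cover_bonus cover edges covers → Spec_fitness_cover_bonus cover edges covers (fitness_cover_bonus cover edges covers)

-- ===== LEMMAS AND PROOFS =====
theorem fused_eq (cover : List Int) (edges : List (Int × Int)) (s : Int) (f : Bool) :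
    edges.foldl (fun (st : Int × Bool) e =>
      if PySem.List.pyGetD cover e.1 0 = 0 ∧ PySem.List.pyGetD cover e.2 0 = 0 then (st.1, false)
      else if PySem.List.pyGetD cover e.1 0 = 1 ∧ PySem.List.pyGetD cover e.2 0 = 1 then st
      else (st.1 + 5, st.2)) (s, f)
    = (edges.foldl (fun s e =>
        if PySem.List.pyGetD cover e.1 0 = 0 ∧ PySem.List.pyGetD cover e.2 0 = 0 then s + 0
        else if PySem.List.pyGetD cover e.1 0 = 1 ∧ PySem.List.pyGetD cover e.2 0 = 1 then s + 0
        else s + 5) s, f && pv_is_cover cover edges) := by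
  induction edges generalizing s f with
  | nil => simp [pv_is_cover]
  | cons e rest ih =>
    simp only [List.foldl_cons, pv_is_cover]
    split_ifs <;> simp [ih]

-- ===== VERDICT (by name: the statement is the Claim_ definition above) =====
theorem fitness_cover_bonus_spec : Claim_equal_fitness_cover_bonus := by
  intro cover edges covers _ _
  unfold Spec_fitness_cover_bonus fitness_cover_bonus fitness_cover_bonus_alt
  rw [fused_eq]
  simp
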